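-- pv_equiv track=rewrite | github.com/wdi2020/wdi_python | kolokwia_2017/k1_gr1_1ter/zad2_gr1.py | func
-- ===== SOURCE A (Python) =====
-- def func(tab,N):
--     max_dl = 0
--
--     curr_sum = 0
--     curr_sum_ind = 0
--     curr_dl = 0
--     last = 0
--
--     i = 0
--     while i<N:
--         if tab[i] > last:
--             curr_sum += tab[i]
--             curr_sum_ind += i
--             curr_dl+=1
--             last = tab[i]
--             if curr_sum == curr_sum_ind:
--                 if curr_dl > max_dl:
--                     max_dl = curr_dl
--             else:
--                 copy_curr_sum = curr_sum
--                 copy_curr_sum_ind = curr_sum_ind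
--                 copy_curr_dl = curr_dl
--                 j = i-copy_curr_dl + 1
--                 while j < i:
--                     copy_curr_dl -=1
--                     copy_curr_sum -= tab[j]
--                     copy_curr_sum_ind -= j
--                     if copy_curr_sum == copy_curr_sum_ind:
--                         if copy_curr_dl > max_dl:
--                             max_dl = copy_curr_dl
--                             break
--                     j+=1
--         else:
--             curr_sum = tab[i]
--             curr_sum_ind = i
--             curr_dl = 1
--             last = tab[i]
--         i+=1
--     return max_dl
-- ===== SOURCE B (Python) =====
-- def func(tab, N):
--     # One pass: per strictly-increasing run, hashmap from prefix sum of (tab[k]-k)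
--     # to its earliest position replaces A's inner backward scan.
--     best = 0
--     pref = 0
--     first = {}
--     last = 0
--     i = 0
--     while i < N:
--         v = tab[i]
--         if v > last:
--             if pref not in first:
--                 first[pref] = i
--             pref += v - i
--             a = first.get(pref)
--             if a is not None and i + 1 - a > best:
--                 best = i + 1 - a
--         else:
--             first = {0: i}
--             pref = v - i
--         last = v
--         i += 1
--     return best
-- ===== Notes on version B (the rewrite author's own statement) =====
-- stated objective: faster
-- what changed: A re-scans the current strictly-increasing run backwards at every position to find the longest zero-sum suffix; B keeps, per run, a hashmap from the running prefix sum of (tab[k]-k) to its earliest position, so each position is handled with one O(1) lookup and the inner scan disappears.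
import Mathlib
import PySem

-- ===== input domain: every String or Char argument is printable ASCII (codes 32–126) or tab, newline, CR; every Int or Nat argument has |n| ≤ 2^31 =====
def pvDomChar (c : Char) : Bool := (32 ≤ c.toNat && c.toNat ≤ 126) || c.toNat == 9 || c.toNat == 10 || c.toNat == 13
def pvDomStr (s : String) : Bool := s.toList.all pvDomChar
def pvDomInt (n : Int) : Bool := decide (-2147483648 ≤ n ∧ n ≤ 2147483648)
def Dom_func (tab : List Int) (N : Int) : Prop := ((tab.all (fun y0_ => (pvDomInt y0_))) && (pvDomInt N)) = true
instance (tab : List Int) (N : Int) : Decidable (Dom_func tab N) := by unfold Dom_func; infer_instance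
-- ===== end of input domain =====

-- B removes A's O(run) inner scan with a per-run hashmap of earliest prefix-sum positions (asymptotic speed-up).

-- ===== PORT A =====
-- inner 'while j < i' loop of A; fuel = (i - j).toNat, exact since j increases by 1 each turn
def funcInner (tab : List Int) (i : Int) (maxDl : Int) (ccs ccsi ccd j : Int) : Nat → Int
  | 0 => maxDl
  | fuel + 1 =>
    if j < i then
      let ccd' := ccd - 1
      let ccs' := ccs - PySem.List.pyGetD tab j 0   -- tab[j]; Pre_ keeps the index in range
      let ccsi' := ccsi - j
      if ccs' = ccsi' then
        if ccd' > maxDl then ccd'   -- update max_dl and break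
        else funcInner tab i maxDl ccs' ccsi' ccd' (j + 1) fuel
      else funcInner tab i maxDl ccs' ccsi' ccd' (j + 1) fuel
    else maxDl

-- outer 'while i < N' loop of A; fuel = (N - i).toNat
def funcLoop (tab : List Int) (N : Int) (maxDl cs csi cd last i : Int) : Nat → Int
  | 0 => maxDl
  | fuel + 1 =>
    if i < N then
      let t := PySem.List.pyGetD tab i 0   -- tab[i]; Pre_ keeps the index in range
      if t > last then
        let cs' := cs + t
        let csi' := csi + i
        let cd' := cd + 1
        if cs' = csi' then
          let maxDl' := if cd' > maxDl then cd' else maxDl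
          funcLoop tab N maxDl' cs' csi' cd' t (i + 1) fuel
        else
          let j0 := i - cd' + 1
          let maxDl' := funcInner tab i maxDl cs' csi' cd' j0 ((i - j0).toNat)
          funcLoop tab N maxDl' cs' csi' cd' t (i + 1) fuel
      else
        funcLoop tab N maxDl t i 1 t (i + 1) fuel
    else maxDl

def func (tab : List Int) (N : Int) : Int :=
  funcLoop tab N 0 0 0 0 0 0 N.toNat

-- ===== PORT B =====
-- B's 'while i < N' loop; fuel = (N - i).toNat
def funcAltLoop (tab : List Int) (N : Int) (best pref : Int) (first : PySem.Dict Int Int) (last i : Int) : Nat → Int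
  | 0 => best
  | fuel + 1 =>
    if i < N then
      let v := PySem.List.pyGetD tab i 0   -- tab[i]; Pre_ keeps the index in range
      if v > last then
        let first' := if (first.get? pref).isSome then first else first.insert pref i  -- 'if pref not in first: first[pref] = i'
        let pref' := pref + v - i
        let best' := match first'.get? pref' with
          | some a => if i + 1 - a > best then i + 1 - a else best
          | none => best
        funcAltLoop tab N best' pref' first' v (i + 1) fuel
      else
        funcAltLoop tab N best (v - i) (PySem.Dict.empty.insert 0 i) v (i + 1) fuel
    else best

def func_alt (tab : List Int) (N : Int) : Int :=
  funcAltLoop tab N 0 0 PySem.Dict.empty 0 0 N.toNat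

-- ===== PRECONDITION & SPEC =====
-- A indexes tab[i] for every 0 ≤ i < N, so it raises IndexError iff N > len(tab); exactly those inputs are excluded.
def Pre_func (tab : List Int) (N : Int) : Prop := N ≤ (tab.length : Int)
instance (tab : List Int) (N : Int) : Decidable (Pre_func tab N) := by unfold Pre_func; infer_instance

def pvWitness_func : List Int × Int := ([3, 1, 2, 5, 4], 5)

def Spec_func (tab : List Int) (N : Int) (out : Int) : Prop := out = func_alt tab N
instance (tab : List Int) (N : Int) (out : Int) : Decidable (Spec_func tab N out) := by unfold Spec_func; infer_instance

-- ===== CLAIM (what is proved, stated in full; the proofs are below) =====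
def Claim_equal_func : Prop := ∀ (tab : List Int) (N : Int), Dom_func tab N → Pre_func tab N → Spec_func tab N (func tab N)

-- ===== LEMMAS AND PROOFS =====

-- prefix sum of (tab[s+m] - (s+m)) over the first n elements of the run starting at s
def prefF (tab : List Int) (s : Int) : Nat → Int
  | 0 => 0
  | n + 1 => prefF tab s n + (PySem.List.pyGetD tab (s + (n : Int)) 0 - (s + (n : Int)))

-- earliest position s+c' (c ≤ c' < c+k) whose run-prefix equals v
def ffrom (tab : List Int) (s v : Int) (c : Nat) : Nat → Option Int
  | 0 => none
  | k + 1 => if prefF tab s c = v then some (s + (c : Int)) else ffrom tab s v (c + 1) k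

lemma ffrom_snoc (tab : List Int) (s v : Int) : ∀ (k c : Nat),
    ffrom tab s v c (k + 1)
      = match ffrom tab s v c k with
        | some a => some a
        | none => if prefF tab s (c + k) = v then some (s + ((c + k : Nat) : Int)) else none := by
  intro k
  induction k with
  | zero => intro c; simp [ffrom]
  | succ k ih =>
    intro c
    show ffrom tab s v c (k + 2) = _
    rw [show ffrom tab s v c (k + 2) =
        (if prefF tab s c = v then some (s + (c : Int)) else ffrom tab s v (c + 1) (k + 1)) from rfl]
    rw [ih (c + 1)]
    rw [show ffrom tab s v c (k + 1) =
        (if prefF tab s c = v then some (s + (c : Int)) else ffrom tab s v (c + 1) k) from rfl]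
    by_cases h : prefF tab s c = v
    · simp [h]
    · simp only [h, if_false]
      have : c + 1 + k = c + (k + 1) := by omega
      rw [this]

lemma ffrom_bound (tab : List Int) (s v : Int) : ∀ (k c : Nat) (a : Int),
    ffrom tab s v c k = some a → (s + (c : Int)) ≤ a ∧ a ≤ s + (c : Int) + (k : Int) - 1 := by
  intro k
  induction k with
  | zero => intro c a h; simp [ffrom] at h
  | succ k ih =>
    intro c a h
    rw [show ffrom tab s v c (k + 1) =
        (if prefF tab s c = v then some (s + (c : Int)) else ffrom tab s v (c + 1) k) from rfl] at h
    by_cases hp : prefF tab s c = v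
    · simp [hp] at h; omega
    · simp only [hp, if_false] at h
      have := ih (c + 1) a h
      push_cast at this ⊢
      omega

-- the inner loop of A computes the earliest matching run-prefix position, just like B's lookup
lemma inner_eq (tab : List Int) (s : Int) (n : Nat) : ∀ (k m : Nat), m + k = n →
    ∀ (maxDl ccs ccsi : Int), ccs - ccsi = prefF tab s (n + 1) - prefF tab s m →
    funcInner tab (s + (n : Int)) maxDl ccs ccsi ((n : Int) + 1 - (m : Int)) (s + (m : Int)) k
      = match ffrom tab s (prefF tab s (n + 1)) (m + 1) k with
        | some a => if s + (n : Int) + 1 - a > maxDl then s + (n : Int) + 1 - a else maxDl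
        | none => maxDl := by
  intro k
  induction k with
  | zero => intro m hm maxDl ccs ccsi hd; simp [funcInner, ffrom]
  | succ k ih =>
    intro m hm maxDl ccs ccsi hd
    have hj : s + (m : Int) < s + (n : Int) := by
      have : (m : Int) < (n : Int) := by exact_mod_cast (by omega : m < n)
      omega
    rw [show funcInner tab (s + (n : Int)) maxDl ccs ccsi ((n : Int) + 1 - (m : Int)) (s + (m : Int)) (k + 1)
        = (if s + (m : Int) < s + (n : Int) then
            (let ccd' := ((n : Int) + 1 - (m : Int)) - 1
             let ccs' := ccs - PySem.List.pyGetD tab (s + (m : Int)) 0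
             let ccsi' := ccsi - (s + (m : Int))
             if ccs' = ccsi' then
               if ccd' > maxDl then ccd'
               else funcInner tab (s + (n : Int)) maxDl ccs' ccsi' ccd' (s + (m : Int) + 1) k
             else funcInner tab (s + (n : Int)) maxDl ccs' ccsi' ccd' (s + (m : Int) + 1) k)
          else maxDl) from rfl]
    rw [if_pos hj]
    have hd' : (ccs - PySem.List.pyGetD tab (s + (m : Int)) 0) - (ccsi - (s + (m : Int)))
        = prefF tab s (n + 1) - prefF tab s (m + 1) := by
      rw [show prefF tab s (m + 1) = prefF tab s m + (PySem.List.pyGetD tab (s + (m : Int)) 0 - (s + (m : Int))) from rfl]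
      omega
    have hcond : ((ccs - PySem.List.pyGetD tab (s + (m : Int)) 0) = (ccsi - (s + (m : Int))))
        ↔ prefF tab s (m + 1) = prefF tab s (n + 1) := by omega
    rw [show ffrom tab s (prefF tab s (n + 1)) (m + 1) (k + 1)
        = (if prefF tab s (m + 1) = prefF tab s (n + 1) then some (s + ((m + 1 : Nat) : Int))
           else ffrom tab s (prefF tab s (n + 1)) (m + 2) k) from rfl]
    by_cases hmatch : prefF tab s (m + 1) = prefF tab s (n + 1)
    · rw [if_pos hmatch]
      simp only []
      rw [if_pos (hcond.mpr hmatch)]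
      have hlen : (n : Int) + 1 - (m : Int) - 1 = s + (n : Int) + 1 - (s + ((m + 1 : Nat) : Int)) := by
        push_cast; omega
      by_cases himp : (n : Int) + 1 - (m : Int) - 1 > maxDl
      · rw [if_pos himp, if_pos (by omega : s + (n : Int) + 1 - (s + ((m + 1 : Nat) : Int)) > maxDl)]
        omega
      · rw [if_neg himp, if_neg (by push_cast at hlen ⊢; omega)]
        -- recurse; any later match is shorter, so the result stays maxDl
        have hrec := ih (m + 1) (by omega) maxDl
          (ccs - PySem.List.pyGetD tab (s + (m : Int)) 0) (ccsi - (s + (m : Int))) hd'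
        rw [show ((n : Int) + 1 - ((m + 1 : Nat) : Int)) = (n : Int) + 1 - (m : Int) - 1 by push_cast; omega] at hrec
        rw [show (s + ((m + 1 : Nat) : Int)) = s + (m : Int) + 1 by push_cast; omega] at hrec
        rw [hrec]
        cases hf : ffrom tab s (prefF tab s (n + 1)) (m + 1 + 1) k with
        | none => rfl
        | some a =>
          have hb := ffrom_bound tab s _ k (m + 1 + 1) a hf
          show (if s + (n : Int) + 1 - a > maxDl then s + (n : Int) + 1 - a else maxDl) = maxDl
          rw [if_neg (by push_cast at hb ⊢; omega)]
    · rw [if_neg hmatch]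
      simp only []
      rw [if_neg (fun h => hmatch (hcond.mp h))]
      have hrec := ih (m + 1) (by omega) maxDl
        (ccs - PySem.List.pyGetD tab (s + (m : Int)) 0) (ccsi - (s + (m : Int))) hd'
      rw [show ((n : Int) + 1 - ((m + 1 : Nat) : Int)) = (n : Int) + 1 - (m : Int) - 1 by push_cast; omega] at hrec
      rw [show (s + ((m + 1 : Nat) : Int)) = s + (m : Int) + 1 by push_cast; omega] at hrec
      rw [hrec]

-- the setdefault step extends the dict invariant by one run position
lemma dict_step (tab : List Int) (s : Int) (n : Nat) (first : PySem.Dict Int Int)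
    (hinv : ∀ v, first.get? v = ffrom tab s v 0 n) :
    ∀ v, ((if (first.get? (prefF tab s n)).isSome then first
           else first.insert (prefF tab s n) (s + (n : Int))).get? v) = ffrom tab s v 0 (n + 1) := by
  intro v
  rw [ffrom_snoc tab s v n 0]
  simp only [Nat.zero_add]
  by_cases hc : (first.get? (prefF tab s n)).isSome
  · rw [if_pos hc, hinv v]
    cases hf : ffrom tab s v 0 n with
    | some a => rfl
    | none =>
      by_cases hv : prefF tab s n = v
      · exfalso
        rw [hv, hinv v, hf] at hc
        simp at hc
      · simp [hv]
  · rw [if_neg hc]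
    by_cases hv : v = prefF tab s n
    · rw [hv, PySem.Dict.get?_insert_self]
      have hnone : ffrom tab s (prefF tab s n) 0 n = none := by
        rw [← hinv (prefF tab s n)]
        cases h : first.get? (prefF tab s n) with
        | none => rfl
        | some a => exact absurd (by rw [h]; rfl) hc
      rw [hnone]
      simp
    · rw [PySem.Dict.get?_insert_of_ne _ _ hv, hinv v]
      cases hf : ffrom tab s v 0 n with
      | some a => rfl
      | none =>
        have hv' : prefF tab s n ≠ v := fun h => hv h.symm
        simp [hv']

-- main simulation: A's outer loop equals B's loop under the run invariant
lemma loop_eq (tab : List Int) (N : Int) : ∀ (fuel : Nat) (s : Int) (n : Nat)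
    (maxDl cs csi lastv : Int) (first : PySem.Dict Int Int),
    cs - csi = prefF tab s n →
    (∀ v, first.get? v = ffrom tab s v 0 n) →
    funcLoop tab N maxDl cs csi (n : Int) lastv (s + (n : Int)) fuel
      = funcAltLoop tab N maxDl (prefF tab s n) first lastv (s + (n : Int)) fuel := by
  intro fuel
  induction fuel with
  | zero => intro s n maxDl cs csi lastv first _ _; rfl
  | succ fuel ih =>
    intro s n maxDl cs csi lastv first hd hinv
    set i := s + (n : Int) with hi
    simp only [funcLoop, funcAltLoop]
    by_cases hiN : i < N
    · rw [if_pos hiN, if_pos hiN]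
      set t := PySem.List.pyGetD tab i 0 with ht
      by_cases hinc : t > lastv
      · rw [if_pos hinc, if_pos hinc]
        have hpref1 : prefF tab s (n + 1) = prefF tab s n + (t - i) := rfl
        have hd' : (cs + t) - (csi + i) = prefF tab s (n + 1) := by omega
        have hpref'eq : prefF tab s n + t - i = prefF tab s (n + 1) := by omega
        have hfirst' := dict_step tab s n first hinv
        rw [← hi] at hfirst'
        rw [hpref'eq]
        rw [hfirst' (prefF tab s (n + 1))]
        -- the next run state after this step, shared by both sides
        have hIH : ∀ M : Int,
            funcLoop tab N M (cs + t) (csi + i) ((n : Int) + 1) t (i + 1) fuel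
              = funcAltLoop tab N M (prefF tab s (n + 1))
                  (if (first.get? (prefF tab s n)).isSome then first
                   else first.insert (prefF tab s n) i) t (i + 1) fuel := by
          intro M
          have := ih s (n + 1) M (cs + t) (csi + i) t
            (if (first.get? (prefF tab s n)).isSome then first
             else first.insert (prefF tab s n) i) hd' hfirst'
          rw [show (s + ((n + 1 : Nat) : Int)) = i + 1 by rw [hi]; push_cast; ring] at this
          rw [show (((n + 1 : Nat) : Int)) = (n : Int) + 1 by push_cast; ring] at this
          exact this
        by_cases hz : cs + t = csi + i
        · rw [if_pos hz]
          have hT0 : prefF tab s (n + 1) = 0 := by omega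
          have hf0 : ffrom tab s (prefF tab s (n + 1)) 0 (n + 1) = some s := by
            rw [show ffrom tab s (prefF tab s (n + 1)) 0 (n + 1)
                = (if prefF tab s 0 = prefF tab s (n + 1) then some (s + ((0 : Nat) : Int))
                   else ffrom tab s (prefF tab s (n + 1)) 1 n) from rfl]
            rw [if_pos (by rw [hT0]; rfl)]
            norm_num
          rw [hf0]
          show funcLoop tab N (if (n : Int) + 1 > maxDl then (n : Int) + 1 else maxDl)
                 (cs + t) (csi + i) ((n : Int) + 1) t (i + 1) fuel
              = funcAltLoop tab N (if i + 1 - s > maxDl then i + 1 - s else maxDl)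
                  (prefF tab s (n + 1))
                  (if (first.get? (prefF tab s n)).isSome then first
                   else first.insert (prefF tab s n) i) t (i + 1) fuel
          rw [show i + 1 - s = (n : Int) + 1 by omega]
          exact hIH _
        · rw [if_neg hz]
          have hTnz : prefF tab s (n + 1) ≠ 0 := by omega
          have hf1 : ffrom tab s (prefF tab s (n + 1)) 0 (n + 1)
              = ffrom tab s (prefF tab s (n + 1)) 1 n := by
            rw [show ffrom tab s (prefF tab s (n + 1)) 0 (n + 1)
                = (if prefF tab s 0 = prefF tab s (n + 1) then some (s + ((0 : Nat) : Int))
                   else ffrom tab s (prefF tab s (n + 1)) 1 n) from rfl]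
            rw [if_neg (by rw [show prefF tab s 0 = 0 from rfl]; omega)]
          rw [hf1]
          rw [show i - ((n : Int) + 1) + 1 = s by omega]
          rw [show ((i - s).toNat) = n by omega]
          have hInner := inner_eq tab s n n 0 (by omega) maxDl (cs + t) (csi + i)
            (by rw [hd', show prefF tab s 0 = 0 from rfl]; ring)
          rw [show (((0 : Nat) : Int)) = (0 : Int) by norm_num] at hInner
          rw [show ((n : Int) + 1 - (0 : Int)) = (n : Int) + 1 by ring] at hInner
          rw [show (s + (0 : Int)) = s by ring] at hInner
          rw [← hi] at hInner
          rw [show (0 + 1 : Nat) = 1 from rfl] at hInner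
          rw [hInner]
          exact hIH _
      · rw [if_neg hinc, if_neg hinc]
        have hd1 : t - i = prefF tab i 1 := by
          rw [show prefF tab i 1
              = prefF tab i 0 + (PySem.List.pyGetD tab (i + ((0 : Nat) : Int)) 0 - (i + ((0 : Nat) : Int))) from rfl]
          rw [show prefF tab i 0 = 0 from rfl]
          rw [show (((0 : Nat) : Int)) = (0 : Int) by norm_num]
          rw [add_zero, ht]
          ring
        have hinv1 : ∀ v, (PySem.Dict.empty.insert (0 : Int) i).get? v = ffrom tab i v 0 1 := by
          intro v
          rw [show ffrom tab i v 0 1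
              = (if prefF tab i 0 = v then some (i + ((0 : Nat) : Int)) else ffrom tab i v 1 0) from rfl]
          rw [show prefF tab i 0 = 0 from rfl]
          by_cases hv : v = 0
          · rw [hv, PySem.Dict.get?_insert_self, if_pos rfl]
            norm_num
          · rw [PySem.Dict.get?_insert_of_ne _ _ hv, if_neg (fun h => hv h.symm)]
            rw [show ffrom tab i v 1 0 = none from rfl, PySem.Dict.get?_empty]
        have := ih i 1 maxDl t i t (PySem.Dict.empty.insert 0 i) (by rw [← hd1]) hinv1
        rw [show (i + ((1 : Nat) : Int)) = i + 1 by norm_num] at this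
        rw [show (((1 : Nat) : Int)) = (1 : Int) by norm_num] at this
        rw [this, hd1]
    · rw [if_neg hiN, if_neg hiN]

-- ===== VERDICT (by name: the statement is the Claim_ definition above) =====
theorem func_spec : Claim_equal_func := by
  intro tab N _ _
  show func tab N = func_alt tab N
  have := loop_eq tab N N.toNat 0 0 0 0 0 0 PySem.Dict.empty
    (by norm_num [prefF])
    (by intro v; simp [ffrom, PySem.Dict.get?_empty])
  simpa [func, func_alt, prefF] using this
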